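-- pv_equiv track=rewrite | github.com/JadeMaveric/AoC-22 | solutions/8_treehouse/test_a.py | get_scenic_scores
-- ===== SOURCE A (Python) =====
-- def get_scenic_scores(row):
--   score = []
--
--   for idx, cell in enumerate(row):
--     curr_score = 0
--
--     for curr in row[idx+1:]:
--       curr_score += 1
--       if curr >= cell:
--         break
--
--     score.append(curr_score)
--
--   return score
-- ===== SOURCE B (Python) =====
-- def get_scenic_scores(row):
--     n = len(row)
--     score = [0] * n
--     stack = []  # (index, height) pairs; heights strictly increasing from top of stack downward
--     for idx in range(n - 1, -1, -1):
--         cell = row[idx]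
--         while stack and stack[-1][1] < cell:
--             stack.pop()
--         score[idx] = (stack[-1][0] - idx) if stack else (n - 1 - idx)
--         stack.append((idx, cell))
--     return score
-- ===== Notes on version B (the rewrite author's own statement) =====
-- stated objective: faster
-- what changed: Replaced the per-cell rightward rescan with a single right-to-left pass keeping a monotonic stack of (index, height) pairs, so each cell's blocking-tree distance is found by popping shorter trees once.
import Mathlib
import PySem

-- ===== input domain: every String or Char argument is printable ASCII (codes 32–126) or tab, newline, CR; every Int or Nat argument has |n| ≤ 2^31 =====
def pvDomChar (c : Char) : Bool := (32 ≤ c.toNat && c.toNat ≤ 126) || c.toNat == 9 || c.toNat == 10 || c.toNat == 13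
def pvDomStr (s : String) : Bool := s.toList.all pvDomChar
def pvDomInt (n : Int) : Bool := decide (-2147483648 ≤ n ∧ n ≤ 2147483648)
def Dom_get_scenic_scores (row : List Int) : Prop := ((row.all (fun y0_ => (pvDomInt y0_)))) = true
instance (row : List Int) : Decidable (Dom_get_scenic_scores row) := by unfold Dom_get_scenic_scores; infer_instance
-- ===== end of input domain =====

-- B replaces A's per-cell rightward rescan (O(n^2)) with one right-to-left pass over a
-- monotonic stack of (index, height) pairs (O(n)); same return value on every input.

-- ===== PORT A =====
-- inner 'for curr in row[idx+1:]' loop: add 1 per tree, break at the first curr >= cell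
def pvInnerA (cell : Int) : List Int → Int
  | [] => 0
  | c :: rest => if c ≥ cell then 1 else 1 + pvInnerA cell rest

def get_scenic_scores (row : List Int) : List Int :=
  (PySem.List.enumerate row 0).foldl
    (fun score p => score ++ [pvInnerA p.2 (PySem.List.slice row (some (p.1 + 1)) none)]) []

-- ===== PORT B =====
-- the 'while stack and stack[-1][1] < cell: stack.pop()' loop
def pvPop (cell : Int) : List (Int × Int) → List (Int × Int)
  | [] => []
  | (j, v) :: rest => if v < cell then pvPop cell rest else (j, v) :: rest

-- the 'for idx in range(n-1, -1, -1)' loop; scores are prepended so the result is in index order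
def pvGoB (n : Int) : List (Int × Int) → List (Int × Int) → List Int → List Int
  | [], _, acc => acc
  | (idx, cell) :: rest, st, acc =>
    let st' := pvPop cell st
    let s := match st' with
      | [] => n - 1 - idx
      | (j, _) :: _ => j - idx
    pvGoB n rest ((idx, cell) :: st') (s :: acc)

def get_scenic_scores_alt (row : List Int) : List Int :=
  pvGoB (row.length : Int) ((PySem.List.enumerate row 0).reverse) [] []

-- ===== PRECONDITION & SPEC =====
def Spec_get_scenic_scores (row : List Int) (out : List Int) : Prop := out = get_scenic_scores_alt row
instance (row : List Int) (out : List Int) : Decidable (Spec_get_scenic_scores row out) := by unfold Spec_get_scenic_scores; infer_instance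

-- ===== CLAIM (what is proved, stated in full; the proofs are below) =====
def Claim_equal_get_scenic_scores : Prop := ∀ (row : List Int), Dom_get_scenic_scores row → Spec_get_scenic_scores row (get_scenic_scores row)

-- ===== LEMMAS AND PROOFS =====

-- what the stack answers for a query height `cell` asked from suffix start k
def pvStAns (n : Int) (k : Nat) (cell : Int) (st : List (Int × Int)) : Int :=
  match pvPop cell st with
  | [] => n - (k : Int)
  | (j, _) :: _ => j - (k : Int) + 1

-- stack invariant: querying the stack equals A's scan of the suffix row[k:]
def pvInv (row : List Int) (k : Nat) (st : List (Int × Int)) : Prop :=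
  ∀ cell, pvStAns (row.length : Int) k cell st = pvInnerA cell (row.drop k)

theorem pvPop_pvPop (b c : Int) (h : b ≤ c) (st : List (Int × Int)) :
    pvPop c (pvPop b st) = pvPop c st := by
  induction st with
  | nil => rfl
  | cons p rest ih =>
    obtain ⟨j, v⟩ := p
    by_cases hv : v < b
    · have hv' : v < c := lt_of_lt_of_le hv h
      simp [pvPop, hv, hv', ih]
    · simp [pvPop, hv]

theorem pvInv_step (row : List Int) (k : Nat) (hk : k < row.length)
    (st : List (Int × Int)) (hst : pvInv row (k + 1) st) :
    pvInv row k (((k : Int), row[k]) :: pvPop row[k] st) := by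
  intro c
  have hdrop : row.drop k = row[k] :: row.drop (k + 1) := List.drop_eq_getElem_cons hk
  by_cases hc : row[k] < c
  · have h1 : pvPop c (((k : Int), row[k]) :: pvPop row[k] st) = pvPop c st := by
      simp [pvPop, hc, pvPop_pvPop row[k] c (le_of_lt hc)]
    have h2 := hst c
    unfold pvStAns at h2 ⊢
    rw [h1, hdrop]
    simp only [pvInnerA, not_le.mpr hc, ← h2]
    cases hp : pvPop c st with
    | nil => push_cast; ring
    | cons q tl => obtain ⟨j, v⟩ := q; push_cast; ring
  · have h1 : pvPop c (((k : Int), row[k]) :: pvPop row[k] st)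
        = ((k : Int), row[k]) :: pvPop row[k] st := by
      simp [pvPop, hc]
    unfold pvStAns
    rw [h1, hdrop]
    simp [pvInnerA, le_of_not_gt hc]

-- A's per-cell value, keyed by the enumerate pair
def pvF (row : List Int) (p : Int × Int) : Int := pvInnerA p.2 (row.drop (p.1.toNat + 1))

theorem pvGoB_take (row : List Int) :
    ∀ (k : Nat), k ≤ row.length → ∀ (st : List (Int × Int)) (acc : List Int),
    pvInv row k st →
    pvGoB (row.length : Int) (((PySem.List.enumerate row 0).take k).reverse) st acc
      = ((PySem.List.enumerate row 0).take k).map (pvF row) ++ acc := by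
  intro k
  induction k with
  | zero => intro _ st acc _; simp [pvGoB]
  | succ k ih =>
    intro hk st acc hst
    have hk' : k < row.length := by omega
    have hke : k < (PySem.List.enumerate row 0).length := by
      simp [PySem.List.length_enumerate]; omega
    have htake : (PySem.List.enumerate row 0).take (k + 1)
        = (PySem.List.enumerate row 0).take k ++ [(PySem.List.enumerate row 0)[k]] := by
      rw [List.take_add_one]; simp [List.getElem?_eq_getElem hke]
    have hget : (PySem.List.enumerate row 0)[k] = ((k : Int), row[k]) := by
      rw [PySem.List.getElem_enumerate]; simp
    -- the score emitted at index k is A's value there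
    have hscore : (match pvPop row[k] st with
        | [] => (row.length : Int) - 1 - (k : Int)
        | (j, _) :: _ => j - (k : Int)) = pvF row ((k : Int), row[k]) := by
      have h2 := hst row[k]
      unfold pvStAns at h2
      unfold pvF
      simp only [Int.toNat_natCast]
      rw [← h2]
      cases hp : pvPop row[k] st with
      | nil => push_cast; ring
      | cons q tl => obtain ⟨j, v⟩ := q; push_cast; ring
    rw [htake, List.reverse_append, hget]
    simp only [List.reverse_singleton, List.singleton_append]
    rw [show pvGoB (row.length : Int) (((k : Int), row[k]) ::
          ((PySem.List.enumerate row 0).take k).reverse) st acc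
        = pvGoB (row.length : Int) (((PySem.List.enumerate row 0).take k).reverse)
            (((k : Int), row[k]) :: pvPop row[k] st)
            ((match pvPop row[k] st with
              | [] => (row.length : Int) - 1 - (k : Int)
              | (j, _) :: _ => j - (k : Int)) :: acc) from rfl]
    rw [ih (le_of_lt hk') _ _ (pvInv_step row k hk' st hst), hscore]
    simp [List.map_append]

theorem pvFoldl_append {α β : Type} (f : α → β) :
    ∀ (l : List α) (acc : List β),
    l.foldl (fun a x => a ++ [f x]) acc = acc ++ l.map f := by
  intro l
  induction l with
  | nil => simp
  | cons x xs ih => intro acc; simp [List.foldl_cons, ih]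

-- ===== VERDICT (by name: the statement is the Claim_ definition above) =====
theorem get_scenic_scores_spec : Claim_equal_get_scenic_scores := by
  intro row _
  unfold Spec_get_scenic_scores get_scenic_scores get_scenic_scores_alt
  rw [pvFoldl_append]
  have hinv : pvInv row row.length [] := by
    intro c
    unfold pvStAns
    simp [pvPop, List.drop_length, pvInnerA]
  have hlen : (PySem.List.enumerate row 0).take row.length = PySem.List.enumerate row 0 := by
    apply List.take_of_length_le
    simp [PySem.List.length_enumerate]
  have h := pvGoB_take row row.length (le_refl _) [] [] hinv
  rw [hlen] at h
  rw [h, List.append_nil, List.nil_append]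
  apply List.map_congr_left
  intro p hp
  rw [PySem.List.mem_enumerate_iff] at hp
  obtain ⟨k, hk, rfl⟩ := hp
  unfold pvF
  simp only [Int.zero_add]
  rw [show ((k : Int) + 1) = ((k + 1 : Nat) : Int) by push_cast; ring,
      PySem.List.slice_from_natCast]
  simp
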